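-- pv_equiv track=rewrite | github.com/stevenpenavajr/university-of-kentucky-courses | CS 460G Machine Learning (2018)/shakespeare-text-classifier/nbc.py | getBigramBagOfWords
-- ===== SOURCE A (Python) =====
-- def getBigramBagOfWords(lines):
--     bag = []
--     for line in lines:
--         line = line.split(' ')[:-1]
--         bigram = ""
--         c = 0
--         for word in line:
--             if (c == 1):
--                 bigram += word
--                 bag.append(bigram)
--                 bigram = ""
--                 c = 0
--             bigram += word + " "
--             c += 1
--     return bag
-- ===== SOURCE B (Python) =====
-- def getBigramBagOfWords(lines):
--     bag = []
--     for line in lines: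
--         ws = line.split(' ')[:-1]
--         bag += [a + ' ' + b for a, b in zip(ws, ws[1:])]
--     return bag
-- ===== Notes on version B (the rewrite author's own statement) =====
-- stated objective: simpler
-- what changed: Replaced A's counter/accumulator state machine (bigram buffer, c flag, reset-on-emit) with a direct pairwise traversal zip(ws, ws[1:]) joining adjacent words.
import Mathlib
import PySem

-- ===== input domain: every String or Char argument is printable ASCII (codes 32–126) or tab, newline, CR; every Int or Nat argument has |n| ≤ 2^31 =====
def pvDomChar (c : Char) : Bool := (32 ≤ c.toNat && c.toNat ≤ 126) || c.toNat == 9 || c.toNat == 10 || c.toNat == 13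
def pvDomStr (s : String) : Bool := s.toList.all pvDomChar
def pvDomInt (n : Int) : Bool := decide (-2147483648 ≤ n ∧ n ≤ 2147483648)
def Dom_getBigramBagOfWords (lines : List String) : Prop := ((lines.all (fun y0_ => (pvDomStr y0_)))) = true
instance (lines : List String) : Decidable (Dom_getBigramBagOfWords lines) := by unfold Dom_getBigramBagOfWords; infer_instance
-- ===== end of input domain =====

-- B replaces A's counter/accumulator state machine with a direct pairwise (zip) traversal; objective: simpler.

-- ===== PORT A =====
-- sep " " is nonempty so split? is always some; .getD [] is never taken
-- state: (bag, bigram, c) exactly as in the Python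
def getBigramBagOfWordsStep (st : List String × String × Int) (word : String) : List String × String × Int :=
  let bag := st.1
  let bigram := st.2.1
  let c := st.2.2
  let (bag, bigram, c) :=
    if c == 1 then (bag ++ [bigram ++ word], "", (0 : Int)) else (bag, bigram, c)
  (bag, bigram ++ word ++ " ", c + 1)

def getBigramBagOfWords (lines : List String) : List String :=
  (lines.foldl (fun bag line =>
    let line' := PySem.List.slice ((PySem.Str.split? line " ").getD []) none (some (-1))
    (line'.foldl getBigramBagOfWordsStep (bag, "", 0)).1) [])

-- ===== PORT B =====
def getBigramBagOfWords_alt (lines : List String) : List String :=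
  lines.foldl (fun bag line =>
    let ws := PySem.List.slice ((PySem.Str.split? line " ").getD []) none (some (-1))
    bag ++ (ws.zip ws.tail).map (fun p => p.1 ++ " " ++ p.2)) []

-- ===== PRECONDITION & SPEC =====
def Spec_getBigramBagOfWords (lines : List String) (out : List String) : Prop := out = getBigramBagOfWords_alt lines
instance (lines : List String) (out : List String) : Decidable (Spec_getBigramBagOfWords lines out) := by unfold Spec_getBigramBagOfWords; infer_instance

-- ===== CLAIM (what is proved, stated in full; the proofs are below) =====
def Claim_equal_getBigramBagOfWords : Prop := ∀ (lines : List String), Dom_getBigramBagOfWords lines → Spec_getBigramBagOfWords lines (getBigramBagOfWords lines)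

-- ===== LEMMAS AND PROOFS =====

-- A's inner loop in the steady state (bigram = w ++ " ", c = 1) emits exactly the adjacent pairs.
theorem getBigramBagOfWords_inner (ws : List String) : ∀ (bag : List String) (w : String),
    (ws.foldl getBigramBagOfWordsStep (bag, w ++ " ", 1)).1
      = bag ++ ((w :: ws).zip ws).map (fun p => p.1 ++ " " ++ p.2) := by
  induction ws with
  | nil => intro bag w; simp
  | cons x xs ih =>
    intro bag w
    simp only [List.foldl_cons, getBigramBagOfWordsStep]
    norm_num
    rw [ih]
    simp

-- One line of A equals one line of B.
theorem getBigramBagOfWords_line (ws : List String) (bag : List String) :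
    (ws.foldl getBigramBagOfWordsStep (bag, "", 0)).1
      = bag ++ (ws.zip ws.tail).map (fun p => p.1 ++ " " ++ p.2) := by
  cases ws with
  | nil => simp
  | cons w rest =>
    simp only [List.foldl_cons, getBigramBagOfWordsStep]
    simp only [if_neg (by decide : ¬ ((0 : Int) == 1) = true)]
    norm_num [getBigramBagOfWords_inner]

-- ===== VERDICT (by name: the statement is the Claim_ definition above) =====
theorem getBigramBagOfWords_spec : Claim_equal_getBigramBagOfWords := by
  intro lines _
  unfold Spec_getBigramBagOfWords getBigramBagOfWords getBigramBagOfWords_alt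
  congr 1
  funext bag line
  simp only []
  exact getBigramBagOfWords_line _ bag
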